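-- pv_equiv track=rewrite | github.com/rmaze/adventofcode | python/day_9/solution_pt2.py | find_free_spans
-- ===== SOURCE A (Python) =====
-- def find_free_spans(blocks: list) -> list:
--     """
--     Scan 'blocks' and return a list of tuples (start_index, span_length)
--     for each contiguous region of free space ('.') in the disk.
--     """
--     free_spans = []
--     start = None
--
--     for i, b in enumerate(blocks):
--         if b == ".":
--             if start is None:
--                 start = i
--         else:
--             if start is not None:
--                 # We reached the end of a free span
--                 free_spans.append((start, i - start))
--                 start = None
--
--     # If the disk ends with free space
--     if start is not None:
--         free_spans.append((start, len(blocks) - start))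
--
--     return free_spans
-- ===== SOURCE B (Python) =====
-- def find_free_spans(blocks: list) -> list:
--     """Run-at-a-time scan: on each '.', consume the whole free run at once."""
--     spans = []
--     i = 0
--     n = len(blocks)
--     while i < n:
--         if blocks[i] == ".":
--             j = i + 1
--             while j < n and blocks[j] == ".":
--                 j += 1
--             spans.append((i, j - i))
--             i = j
--         else:
--             i += 1
--     return spans
-- ===== Notes on version B (the rewrite author's own statement) =====
-- stated objective: alternative
-- what changed: Replaced the nullable-start state machine (Optional start carried across a single enumerate loop with a final flush) by a run-at-a-time two-pointer scan that, upon meeting a '.', advances an inner pointer to the end of the free run and emits the span immediately, so no Option state and no end-of-list flush exist.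
import Mathlib
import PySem

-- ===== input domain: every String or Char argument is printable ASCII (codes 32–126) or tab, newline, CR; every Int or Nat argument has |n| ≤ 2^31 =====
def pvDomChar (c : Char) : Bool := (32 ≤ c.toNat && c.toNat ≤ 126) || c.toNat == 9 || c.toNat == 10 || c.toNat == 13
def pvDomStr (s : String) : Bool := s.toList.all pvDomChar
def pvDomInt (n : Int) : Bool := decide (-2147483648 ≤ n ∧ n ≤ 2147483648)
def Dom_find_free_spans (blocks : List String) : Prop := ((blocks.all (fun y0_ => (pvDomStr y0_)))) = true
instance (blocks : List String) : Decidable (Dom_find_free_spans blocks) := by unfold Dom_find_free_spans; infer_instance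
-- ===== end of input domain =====

-- B replaces A's nullable-start state machine with a run-at-a-time two-pointer scan (alternative decomposition, same cost).


-- ===== PORT A =====
-- A's loop over enumerate(blocks) carrying (free_spans, start : Option Int); i is the running index.
def aLoop : List String → Int → List (Int × Int) → Option Int → List (Int × Int) × Option Int
  | [], _, spans, start => (spans, start)
  | b :: rest, i, spans, start =>
    if b == "." then
      match start with
      | none => aLoop rest (i + 1) spans (some i)
      | some _ => aLoop rest (i + 1) spans start
    else
      match start with
      | some s => aLoop rest (i + 1) (spans ++ [(s, i - s)]) none
      | none => aLoop rest (i + 1) spans none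

def find_free_spans (blocks : List String) : List (Int × Int) :=
  match aLoop blocks 0 [] none with
  | (spans, some s) => spans ++ [(s, (blocks.length : Int) - s)]
  | (spans, none) => spans

-- ===== PORT B =====
-- length of the leading run of "." (B's inner while loop j)
def freeRun : List String → Nat
  | [] => 0
  | b :: rest => if b == "." then freeRun rest + 1 else 0

-- B's outer while loop: on a '.', emit the whole run and jump past it; else advance by one.
def altGo : List String → Int → List (Int × Int)
  | [], _ => []
  | b :: rest, i =>
    if b == "." then
      let k := freeRun rest
      (i, (k : Int) + 1) :: altGo (rest.drop k) (i + (k : Int) + 1)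
    else
      altGo rest (i + 1)
termination_by l _ => l.length
decreasing_by
  all_goals simp

def find_free_spans_alt (blocks : List String) : List (Int × Int) :=
  altGo blocks 0

-- ===== PRECONDITION & SPEC =====
def Spec_find_free_spans (blocks : List String) (out : List (Int × Int)) : Prop := out = find_free_spans_alt blocks
instance (blocks : List String) (out : List (Int × Int)) : Decidable (Spec_find_free_spans blocks out) := by unfold Spec_find_free_spans; infer_instance

-- ===== CLAIM (what is proved, stated in full; the proofs are below) =====
def Claim_equal_find_free_spans : Prop := ∀ (blocks : List String), Dom_find_free_spans blocks → Spec_find_free_spans blocks (find_free_spans blocks)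

-- ===== LEMMAS AND PROOFS =====

-- closing A's loop with the final flush at end index `e`
def finishAt (e : Int) : List (Int × Int) × Option Int → List (Int × Int)
  | (spans, some s) => spans ++ [(s, e - s)]
  | (spans, none) => spans

theorem freeRun_le (l : List String) : freeRun l ≤ l.length := by
  induction l with
  | nil => simp [freeRun]
  | cons b r ih =>
    simp only [freeRun, List.length_cons]
    split
    · omega
    · omega

-- after the leading dot-run, either the list is exhausted or a non-dot follows
theorem drop_freeRun (l : List String) :
    l.drop (freeRun l) = [] ∨
      ∃ c r, l.drop (freeRun l) = c :: r ∧ (c == ".") = false ∧ r = l.drop (freeRun l + 1) := by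
  induction l with
  | nil => left; simp
  | cons b r ih =>
    by_cases hb : (b == ".") = true
    · simp only [freeRun, hb, if_pos]
      rcases ih with h | ⟨c, r', h1, h2, h3⟩
      · left; simpa using h
      · right; exact ⟨c, r', by simpa using h1, h2, by simpa using h3⟩
    · right
      exact ⟨b, r, by simp [freeRun, hb], by simpa using hb, by simp [freeRun, hb]⟩

-- joint invariant: A's loop from state none / some s agrees with B's run-at-a-time scan
theorem loop_eq (l : List String) :
    (∀ (i : Int) (spans : List (Int × Int)),
        finishAt (i + l.length) (aLoop l i spans none) = spans ++ altGo l i) ∧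
    (∀ (i : Int) (spans : List (Int × Int)) (s : Int),
        finishAt (i + l.length) (aLoop l i spans (some s))
          = spans ++ (s, i - s + (freeRun l : Int)) ::
              altGo (l.drop (freeRun l + 1)) (i + (freeRun l : Int) + 1)) := by
  induction l with
  | nil =>
    constructor
    · intro i spans; simp [aLoop, altGo, finishAt]
    · intro i spans s; simp [aLoop, altGo, freeRun, finishAt]
  | cons b r ih =>
    obtain ⟨ihP, ihQ⟩ := ih
    have step : ∀ (i : Int),
        altGo (r.drop (freeRun r)) (i + (freeRun r : Int) + 1)
          = altGo (r.drop (freeRun r + 1)) (i + (freeRun r : Int) + 2) := by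
      intro i
      rcases drop_freeRun r with h | ⟨c, r', h1, h2, h3⟩
      · have h4 : r.drop (freeRun r + 1) = [] := by
          rw [List.drop_eq_nil_iff] at h ⊢
          have := freeRun_le r
          omega
        rw [h, h4]
        simp [altGo]
      · rw [h1]
        simp only [altGo, h2, Bool.false_eq_true, if_false]
        rw [h3]
        congr 1
        ring
    constructor
    · intro i spans
      by_cases hb : (b == ".") = true
      · simp only [aLoop, altGo, hb, if_pos, List.length_cons]
        push_cast
        rw [show i + ((r.length : Int) + 1) = (i + 1) + (r.length : Int) by ring,
            ihQ (i + 1) spans i, step i]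
        ring_nf
      · have hb' : (b == ".") = false := by simpa using hb
        simp only [aLoop, altGo, hb', Bool.false_eq_true, if_false, List.length_cons]
        push_cast
        rw [show i + ((r.length : Int) + 1) = (i + 1) + (r.length : Int) by ring,
            ihP (i + 1) spans]
    · intro i spans s
      by_cases hb : (b == ".") = true
      · simp only [aLoop, hb, if_pos, List.length_cons, freeRun, List.drop_succ_cons]
        push_cast
        rw [show i + ((r.length : Int) + 1) = (i + 1) + (r.length : Int) by ring,
            ihQ (i + 1) spans s]
        ring_nf
      · have hb' : (b == ".") = false := by simpa using hb
        simp only [aLoop, hb', Bool.false_eq_true, if_false, List.length_cons, freeRun,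
          List.drop_succ_cons, List.drop_zero]
        push_cast
        rw [show i + ((r.length : Int) + 1) = (i + 1) + (r.length : Int) by ring,
            ihP (i + 1) (spans ++ [(s, i - s)])]
        simp

-- ===== VERDICT (by name: the statement is the Claim_ definition above) =====
theorem find_free_spans_spec : Claim_equal_find_free_spans := by
  intro blocks _
  unfold Spec_find_free_spans find_free_spans find_free_spans_alt
  have h := (loop_eq blocks).1 0 []
  simp only [zero_add, List.nil_append] at h
  rw [← h]
  rcases haux : aLoop blocks 0 [] none with ⟨spans, st⟩
  cases st <;> simp [finishAt]
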